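-- pv_equiv track=rewrite | github.com/maximyuss/Yandex | training-6.0/6-2h.py | task_6_2_h
-- ===== SOURCE A (Python) =====
-- def task_6_2_h(n, nums):
--     pref = [0] * n
--     peoples = nums[0]
--     for i in range(1, n):
--         pref[i] = pref[i - 1] + peoples
--         peoples += nums[i]
--     suff, peoples, res = 0, nums[n - 1], pref[n - 1]
--     for i in range(n - 2, -1, -1):
--         suff += peoples
--         peoples += nums[i]
--         curr = pref[i] + suff
--         res = min(res, curr)
--     return res
-- ===== SOURCE B (Python) =====
-- def task_6_2_h(n, nums):
--     cost = sum(j * nums[j] for j in range(n))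
--     res = cost
--     left = nums[0]
--     right = sum(nums[1:n])
--     for i in range(1, n):
--         cost += left - right
--         left += nums[i]
--         right -= nums[i]
--         res = min(res, cost)
--     return res
-- ===== Notes on version B (the rewrite author's own statement) =====
-- stated objective: simpler
-- what changed: B replaces A's prefix-cost array plus separate forward and backward passes by a direct computation of the cost at point 0 and a single left-to-right sweep maintaining only a running cost and scalar left/right people counts.
import Mathlib
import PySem

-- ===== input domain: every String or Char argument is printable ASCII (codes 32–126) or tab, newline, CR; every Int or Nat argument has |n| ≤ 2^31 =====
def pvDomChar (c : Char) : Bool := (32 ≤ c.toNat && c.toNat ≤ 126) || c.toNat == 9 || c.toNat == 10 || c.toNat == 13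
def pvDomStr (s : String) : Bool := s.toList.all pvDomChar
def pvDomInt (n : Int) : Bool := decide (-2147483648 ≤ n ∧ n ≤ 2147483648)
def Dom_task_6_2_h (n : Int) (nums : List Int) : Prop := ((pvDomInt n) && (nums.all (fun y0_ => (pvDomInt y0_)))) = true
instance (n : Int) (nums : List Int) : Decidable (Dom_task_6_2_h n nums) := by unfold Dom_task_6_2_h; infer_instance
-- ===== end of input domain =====

-- B replaces A's prefix-cost array and two passes by a single sweep that maintains
-- only a running cost and scalar left/right people counts (objective: simpler; same O(n) cost).

-- ===== PORT A =====
-- helper: A's first loop (filling `pref` and accumulating `peoples`), kept named for readability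
def pyA_loop1 (nums : List Int) (n : Int) : List Int × Int :=
  (PySem.List.pyRange 1 n 1).foldl
    (fun (st : List Int × Int) i =>
      (PySem.List.pySetD st.1 i (PySem.List.pyGetD st.1 (i - 1) 0 + st.2),
       st.2 + PySem.List.pyGetD nums i 0))
    (List.replicate n.toNat 0, PySem.List.pyGetD nums 0 0)

def task_6_2_h (n : Int) (nums : List Int) : Int :=
  let pref := (pyA_loop1 nums n).1
  ((PySem.List.pyRange (n - 2) (-1) (-1)).foldl
      (fun (st : Int × Int × Int) i =>
        (st.1 + st.2.1,
         st.2.1 + PySem.List.pyGetD nums i 0,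
         min st.2.2 (PySem.List.pyGetD pref i 0 + (st.1 + st.2.1))))
      (0, PySem.List.pyGetD nums (n - 1) 0, PySem.List.pyGetD pref (n - 1) 0)).2.2

-- ===== PORT B =====
def task_6_2_h_alt (n : Int) (nums : List Int) : Int :=
  let cost0 := (PySem.List.pyRange 0 n 1).foldl
    (fun (c : Int) j => c + j * PySem.List.pyGetD nums j 0) 0
  ((PySem.List.pyRange 1 n 1).foldl
      (fun (st : Int × Int × Int × Int) i =>
        (st.1 + st.2.1 - st.2.2.1,
         st.2.1 + PySem.List.pyGetD nums i 0,
         st.2.2.1 - PySem.List.pyGetD nums i 0,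
         min st.2.2.2 (st.1 + st.2.1 - st.2.2.1)))
      (cost0, PySem.List.pyGetD nums 0 0, (PySem.List.slice nums (some 1) (some n)).sum, cost0)).2.2.2

-- ===== PRECONDITION & SPEC =====
-- Pre_ excludes exactly the inputs where Python A raises IndexError: n ≤ 0 (pref[n-1] on the empty pref)
-- or n > len(nums) (nums[i] out of range).
def Pre_task_6_2_h (n : Int) (nums : List Int) : Prop := 1 ≤ n ∧ n ≤ (nums.length : Int)
instance (n : Int) (nums : List Int) : Decidable (Pre_task_6_2_h n nums) := by unfold Pre_task_6_2_h; infer_instance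

def pvWitness_task_6_2_h : Int × List Int := (3, [1, 2, 3])

def Spec_task_6_2_h (n : Int) (nums : List Int) (out : Int) : Prop := out = task_6_2_h_alt n nums
instance (n : Int) (nums : List Int) (out : Int) : Decidable (Spec_task_6_2_h n nums out) := by unfold Spec_task_6_2_h; infer_instance

-- ===== CLAIM (what is proved, stated in full; the proofs are below) =====
def Claim_equal_task_6_2_h : Prop := ∀ (n : Int) (nums : List Int), Dom_task_6_2_h n nums → Pre_task_6_2_h n nums → Spec_task_6_2_h n nums (task_6_2_h n nums)

-- ===== LEMMAS AND PROOFS =====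

-- a j = nums[j]; SS k = sum of the first k entries; PP i = pref[i]; TT i = people at positions ≥ i;
-- QQ i = A's suff value at meeting point i; CC i = total cost of meeting point i.
def pvA (nums : List Int) (j : Nat) : Int := nums.getD j 0
def pvSS (a : Nat → Int) (k : Nat) : Int := ∑ j ∈ Finset.range k, a j
def pvPP (a : Nat → Int) : Nat → Int
  | 0 => 0
  | i + 1 => pvPP a i + pvSS a (i + 1)
def pvTT (a : Nat → Int) (n i : Nat) : Int := pvSS a n - pvSS a i
def pvQQ (a : Nat → Int) (n i : Nat) : Int :=
  if _ : i + 1 < n then pvQQ a n (i + 1) + pvTT a n (i + 1) else 0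
  termination_by n - i
def pvCC (a : Nat → Int) (n i : Nat) : Int := pvPP a i + pvQQ a n i

lemma pvQQ_pos (a : Nat → Int) (n i : Nat) (h : i + 1 < n) :
    pvQQ a n i = pvQQ a n (i + 1) + pvTT a n (i + 1) := by
  rw [pvQQ]; simp [h]

lemma pvQQ_top (a : Nat → Int) (n i : Nat) (h : ¬ i + 1 < n) : pvQQ a n i = 0 := by
  rw [pvQQ]; simp [h]

lemma pvSS_succ (a : Nat → Int) (k : Nat) : pvSS a (k + 1) = pvSS a k + a k :=
  Finset.sum_range_succ _ _

lemma pvTT_step (a : Nat → Int) (n i : Nat) : pvTT a n (i + 1) + a i = pvTT a n i := by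
  simp only [pvTT, pvSS_succ]; ring

lemma sum_map_range_int (f : Nat → Int) (n : Nat) :
    ((List.range n).map f).sum = ∑ i ∈ Finset.range n, f i := by
  induction n with
  | zero => simp
  | succ k ih => rw [List.range_succ, Finset.sum_range_succ]; simp [ih]

lemma set_map_range (n m : Nat) (f : Nat → Int) (v : Int) (_hm : m < n) :
    ((List.range n).map f).set m v = (List.range n).map (fun i => if i = m then v else f i) := by
  apply List.ext_getElem
  · simp
  · intro k h1 h2
    simp only [List.getElem_set, List.getElem_map, List.getElem_range] at *
    by_cases h : k = m
    · simp [h]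
    · rw [if_neg (Ne.symm h), if_neg h]

lemma getD_map_range_int (f : Nat → Int) (n k : Nat) (h : k < n) :
    ((List.range n).map f).getD k 0 = f k := by
  rw [List.getD_eq_getElem _ _ (by simpa using h)]
  simp

lemma loop1_spec (nums : List Int) (n0 : Nat) :
    ∀ m : Nat, 1 ≤ m → m ≤ n0 →
      (PySem.List.pyRange 1 (m : Int) 1).foldl
        (fun (st : List Int × Int) i =>
          (PySem.List.pySetD st.1 i (PySem.List.pyGetD st.1 (i - 1) 0 + st.2),
           st.2 + PySem.List.pyGetD nums i 0))
        (List.replicate n0 0, PySem.List.pyGetD nums 0 0)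
      = ((List.range n0).map (fun i => if i < m then pvPP (pvA nums) i else 0),
         pvSS (pvA nums) m) := by
  intro m
  induction m with
  | zero => intro h1 _; exact absurd h1 (by omega)
  | succ m ih =>
    intro _ hm
    by_cases hm1 : 1 ≤ m
    · obtain ⟨k, rfl⟩ : ∃ k, m = k + 1 := ⟨m - 1, by omega⟩
      have hsplit : PySem.List.pyRange 1 (((k + 1 : Nat) : Int) + 1) 1
          = PySem.List.pyRange 1 ((k + 1 : Nat) : Int) 1 ++ [((k + 1 : Nat) : Int)] :=
        PySem.List.pyRange_one_succ_right (by exact_mod_cast hm1)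
      have ih' := ih hm1 (by omega)
      push_cast at ih' hsplit ⊢
      rw [hsplit, List.foldl_append, ih']
      simp only [List.foldl_cons, List.foldl_nil]
      rw [show ((k : Int) + 1) = ((k + 1 : Nat) : Int) from by push_cast; ring]
      rw [show (((k + 1 : Nat)) : Int) - 1 = ((k : Nat) : Int) from by push_cast; ring]
      rw [PySem.List.pySetD_natCast, PySem.List.pyGetD_natCast, PySem.List.pyGetD_natCast]
      rw [getD_map_range_int _ _ _ (show k < n0 by omega), if_pos (show k < k + 1 by omega)]
      rw [set_map_range _ _ _ _ (show k + 1 < n0 by omega)]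
      simp only [Prod.mk.injEq]
      constructor
      · apply List.map_congr_left
        intro i hi
        by_cases hik : i = k + 1
        · subst hik
          rw [if_pos rfl, if_pos (by omega)]
          rfl
        · rw [if_neg hik]
          split_ifs <;> first | rfl | omega
      · rw [pvSS_succ (pvA nums) (k + 1)]
        rfl
    · have hm0 : m = 0 := by omega
      subst hm0
      rw [show (((0 : Nat) + 1 : Nat) : Int) = 1 by norm_num, PySem.List.pyRange_one_eq_nil le_rfl,
        List.foldl_nil]
      simp only [Prod.mk.injEq]
      constructor
      · symm
        apply List.ext_getElem
        · simp
        · intro j h1 h2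
          simp only [List.getElem_map, List.getElem_range, List.getElem_replicate]
          by_cases hj : j = 0
          · subst hj; simp [pvPP]
          · rw [if_neg (by omega)]
      · simp [pvSS, pvA, PySem.List.pyGetD_zero]

lemma loop2_spec (nums : List Int) (n0 : Nat) (pref : List Int)
    (hpref : ∀ i, i < n0 → pref.getD i 0 = pvPP (pvA nums) i) :
    ∀ i : Nat, i + 1 < n0 → ∀ res : Int,
      ((PySem.List.pyRange (i : Int) (-1) (-1)).foldl
        (fun (st : Int × Int × Int) k =>
          (st.1 + st.2.1,
           st.2.1 + PySem.List.pyGetD nums k 0,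
           min st.2.2 (PySem.List.pyGetD pref k 0 + (st.1 + st.2.1))))
        (pvQQ (pvA nums) n0 (i + 1), pvTT (pvA nums) n0 (i + 1), res)).2.2
      = List.foldl min res (((List.range (i + 1)).reverse).map (pvCC (pvA nums) n0)) := by
  intro i
  induction i with
  | zero =>
    intro h res
    rw [show ((0 : Nat) : Int) = 0 from rfl]
    rw [PySem.List.pyRange_neg_one_cons (by omega)]
    rw [show (0 : Int) - 1 = -1 from rfl, PySem.List.pyRange_neg_one_eq_nil (by omega)]
    simp only [List.foldl_cons, List.foldl_nil]
    rw [PySem.List.pyGetD_zero]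
    rw [hpref 0 (by omega), ← pvQQ_pos (pvA nums) n0 0 h]
    simp [pvCC]
  | succ j ih =>
    intro h res
    have hcons : PySem.List.pyRange ((j + 1 : Nat) : Int) (-1) (-1)
        = ((j + 1 : Nat) : Int) :: PySem.List.pyRange (((j + 1 : Nat) : Int) - 1) (-1) (-1) :=
      PySem.List.pyRange_neg_one_cons (by push_cast; omega)
    rw [show (((j + 1 : Nat)) : Int) - 1 = ((j : Nat) : Int) from by push_cast; ring] at hcons
    rw [hcons]
    simp only [List.foldl_cons]
    rw [PySem.List.pyGetD_natCast, PySem.List.pyGetD_natCast]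
    rw [hpref (j + 1) (by omega), ← pvQQ_pos (pvA nums) n0 (j + 1) h]
    rw [show nums.getD (j + 1) 0 = pvA nums (j + 1) from rfl, pvTT_step (pvA nums) n0 (j + 1)]
    rw [ih (by omega) (min res (pvPP (pvA nums) (j + 1) + pvQQ (pvA nums) n0 (j + 1)))]
    rw [List.range_succ (n := j + 1), List.reverse_append, List.map_append]
    simp [pvCC]

lemma pvCC_step (a : Nat → Int) (n m : Nat) (h : m + 1 < n) :
    pvCC a n m + pvSS a (m + 1) - pvTT a n (m + 1) = pvCC a n (m + 1) := by
  unfold pvCC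
  rw [pvQQ_pos a n m h, show pvPP a (m + 1) = pvPP a m + pvSS a (m + 1) from rfl]
  ring

lemma loop3_spec (nums : List Int) (n0 : Nat) (c0 : Int) (hc0 : c0 = pvCC (pvA nums) n0 0) :
    ∀ m : Nat, m + 1 ≤ n0 →
      (PySem.List.pyRange 1 ((m : Int) + 1) 1).foldl
        (fun (st : Int × Int × Int × Int) i =>
          (st.1 + st.2.1 - st.2.2.1,
           st.2.1 + PySem.List.pyGetD nums i 0,
           st.2.2.1 - PySem.List.pyGetD nums i 0,
           min st.2.2.2 (st.1 + st.2.1 - st.2.2.1)))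
        (c0, pvSS (pvA nums) 1, pvTT (pvA nums) n0 1, c0)
      = (pvCC (pvA nums) n0 m, pvSS (pvA nums) (m + 1), pvTT (pvA nums) n0 (m + 1),
         List.foldl min c0 ((List.range m).map (fun k => pvCC (pvA nums) n0 (k + 1)))) := by
  intro m
  induction m with
  | zero =>
    intro _
    rw [show ((0 : Nat) : Int) + 1 = 1 from by norm_num, PySem.List.pyRange_one_eq_nil le_rfl,
      List.foldl_nil]
    simp [hc0]
  | succ m ih =>
    intro hm
    have hsplit : PySem.List.pyRange 1 (((m : Int) + 1) + 1) 1
        = PySem.List.pyRange 1 ((m : Int) + 1) 1 ++ [(m : Int) + 1] :=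
      PySem.List.pyRange_one_succ_right (by omega)
    push_cast
    rw [hsplit, List.foldl_append, ih (by omega)]
    simp only [List.foldl_cons, List.foldl_nil]
    rw [show ((m : Int) + 1) = ((m + 1 : Nat) : Int) from by push_cast; ring,
      PySem.List.pyGetD_natCast]
    rw [show nums.getD (m + 1) 0 = pvA nums (m + 1) from rfl]
    rw [pvCC_step (pvA nums) n0 m (by omega)]
    rw [← pvSS_succ (pvA nums) (m + 1)]
    rw [show pvTT (pvA nums) n0 (m + 1) - pvA nums (m + 1) = pvTT (pvA nums) n0 (m + 1 + 1) from by
      rw [← pvTT_step (pvA nums) n0 (m + 1)]; ring]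
    rw [List.range_succ, List.map_append, List.foldl_append]
    simp

lemma pvQQ_sum (a : Nat → Int) (n0 : Nat) :
    ∀ d i : Nat, i + d + 1 = n0 →
      pvQQ a n0 i = ∑ k ∈ Finset.range n0, (if i < k then a k * ((k : Int) - (i : Int)) else 0) := by
  intro d
  induction d with
  | zero =>
    intro i hi
    rw [pvQQ_top _ _ _ (by omega)]
    symm
    apply Finset.sum_eq_zero
    intro k hk
    rw [if_neg (by have := Finset.mem_range.mp hk; omega)]
  | succ d ih =>
    intro i hi
    rw [pvQQ_pos _ _ _ (by omega), ih (i + 1) (by omega)]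
    have hsub : pvTT a n0 (i + 1) = ∑ k ∈ Finset.range n0, (if i + 1 ≤ k then a k else 0) := by
      unfold pvTT pvSS
      have h1 : ∑ j ∈ Finset.range (i + 1), a j
          = ∑ k ∈ Finset.range n0, (if k < i + 1 then a k else 0) := by
        rw [← Finset.sum_subset
          (show Finset.range (i + 1) ⊆ Finset.range n0 from by
            intro x hx; simp only [Finset.mem_range] at hx ⊢; omega)
          (fun x _ hx => if_neg (by simpa using hx))]
        exact Finset.sum_congr rfl (fun k hk => (if_pos (Finset.mem_range.mp hk)).symm)
      rw [h1, ← Finset.sum_sub_distrib]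
      exact Finset.sum_congr rfl (fun k _ => by split_ifs <;> omega)
    rw [hsub, ← Finset.sum_add_distrib]
    apply Finset.sum_congr rfl
    intro k hk
    by_cases h1 : i + 1 < k
    · rw [if_pos h1, if_pos (by omega), if_pos (by omega)]
      push_cast
      ring
    · by_cases h2 : k = i + 1
      · subst h2
        rw [if_neg (by omega), if_pos (by omega), if_pos (by omega)]
        push_cast
        ring
      · rw [if_neg (by omega), if_neg (by omega), if_neg (by omega)]
        simp

lemma pvQQ_zero_sum (a : Nat → Int) (n0 : Nat) (h : 1 ≤ n0) :
    pvQQ a n0 0 = ∑ k ∈ Finset.range n0, (k : Int) * a k := by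
  rw [pvQQ_sum a n0 (n0 - 1) 0 (by omega)]
  apply Finset.sum_congr rfl
  intro k _
  by_cases h0 : 0 < k
  · rw [if_pos h0]
    push_cast
    ring
  · have : k = 0 := by omega
    subst this
    simp

lemma cost0_spec (nums : List Int) (n0 : Nat) (h : 1 ≤ n0) :
    (PySem.List.pyRange 0 ((n0 : Nat) : Int) 1).foldl
      (fun (c : Int) j => c + j * PySem.List.pyGetD nums j 0) 0
    = pvCC (pvA nums) n0 0 := by
  rw [PySem.List.foldl_add, PySem.List.pyRange_one]
  simp only [sub_zero, Int.toNat_natCast, List.map_map]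
  rw [sum_map_range_int]
  rw [show pvCC (pvA nums) n0 0 = pvQQ (pvA nums) n0 0 from by simp [pvCC, pvPP]]
  rw [pvQQ_zero_sum (pvA nums) n0 h]
  simp only [zero_add]
  apply Finset.sum_congr rfl
  intro k _
  simp [Function.comp, pvA]

lemma slice_sum_spec (nums : List Int) (n0 : Nat) (h1 : 1 ≤ n0) (h2 : n0 ≤ nums.length) :
    (PySem.List.slice nums (some 1) (some ((n0 : Nat) : Int))).sum = pvTT (pvA nums) n0 1 := by
  rw [PySem.List.slice_toNat (ha := by omega) (hb := by positivity)]
  simp only [Int.toNat_one, Int.toNat_natCast]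
  have hlist : (nums.drop 1).take (n0 - 1)
      = (List.range (n0 - 1)).map (fun k => nums.getD (1 + k) 0) := by
    apply List.ext_getElem
    · simp
      omega
    · intro k hk1 hk2
      simp only [List.getElem_take, List.getElem_drop, List.getElem_map, List.getElem_range]
      rw [List.getD_eq_getElem _ _ (by
        simp only [List.length_take, List.length_drop] at hk1
        omega)]
  rw [hlist, sum_map_range_int]
  unfold pvTT pvSS
  have hsucc := Finset.sum_range_succ' (fun j => pvA nums j) (n0 - 1)
  rw [show n0 - 1 + 1 = n0 from by omega] at hsucc
  rw [hsucc]
  simp only [Finset.sum_range_one]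
  have : ∑ k ∈ Finset.range (n0 - 1), nums.getD (1 + k) 0
      = ∑ k ∈ Finset.range (n0 - 1), pvA nums (k + 1) :=
    Finset.sum_congr rfl (fun k _ => by rw [Nat.add_comm]; rfl)
  rw [this]
  unfold pvA
  ring

lemma foldl_min_perm_cons (x y : Int) (l m : List Int) (h : (x :: l).Perm (y :: m)) :
    l.foldl min x = m.foldl min y := by
  have hx1 := PySem.List.foldl_min_le l x
  have hy1 := PySem.List.foldl_min_le m y
  have hxm : l.foldl min x ∈ x :: l := by
    rcases PySem.List.foldl_min_mem l x with h' | h'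
    · rw [h']; exact List.mem_cons_self
    · exact List.mem_cons_of_mem _ h'
  have hym : m.foldl min y ∈ y :: m := by
    rcases PySem.List.foldl_min_mem m y with h' | h'
    · rw [h']; exact List.mem_cons_self
    · exact List.mem_cons_of_mem _ h'
  have hle : ∀ z ∈ x :: l, l.foldl min x ≤ z := by
    intro z hz
    rcases List.mem_cons.mp hz with rfl | hz
    · exact hx1.1
    · exact hx1.2 z hz
  have hle' : ∀ z ∈ y :: m, m.foldl min y ≤ z := by
    intro z hz
    rcases List.mem_cons.mp hz with rfl | hz
    · exact hy1.1
    · exact hy1.2 z hz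
  exact le_antisymm (hle _ (h.mem_iff.mpr hym)) (hle' _ (h.mem_iff.mp hxm))

lemma portA_char (nums : List Int) (n0 : Nat) (h1 : 1 ≤ n0) (h2 : n0 ≤ nums.length) :
    task_6_2_h ((n0 : Nat) : Int) nums
    = List.foldl min (pvCC (pvA nums) n0 (n0 - 1))
        (((List.range (n0 - 1)).reverse).map (pvCC (pvA nums) n0)) := by
  have hl1 := loop1_spec nums n0 n0 h1 le_rfl
  simp only [task_6_2_h, pyA_loop1, Int.toNat_natCast]
  rw [hl1]
  have hmap : (List.range n0).map (fun i => if i < n0 then pvPP (pvA nums) i else 0)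
      = (List.range n0).map (pvPP (pvA nums)) :=
    List.map_congr_left (fun i hi => if_pos (List.mem_range.mp hi))
  simp only [hmap]
  have hpref : ∀ i, i < n0 → ((List.range n0).map (pvPP (pvA nums))).getD i 0 = pvPP (pvA nums) i :=
    fun i hi => getD_map_range_int _ _ _ hi
  rw [show ((n0 : Nat) : Int) - 1 = ((n0 - 1 : Nat) : Int) from by omega]
  rw [PySem.List.pyGetD_natCast, PySem.List.pyGetD_natCast]
  rw [hpref (n0 - 1) (by omega)]
  have e3 : pvPP (pvA nums) (n0 - 1) = pvCC (pvA nums) n0 (n0 - 1) := by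
    unfold pvCC
    rw [pvQQ_top _ _ _ (by omega)]
    ring
  by_cases hn1 : n0 = 1
  · subst hn1
    rw [show ((1 : Nat) : Int) - 2 = -1 from by norm_num,
      PySem.List.pyRange_neg_one_eq_nil (by omega), List.foldl_nil]
    simpa using e3
  · rw [show ((n0 : Nat) : Int) - 2 = ((n0 - 2 : Nat) : Int) from by omega]
    have hl2 := loop2_spec nums n0 _ hpref (n0 - 2) (by omega) (pvCC (pvA nums) n0 (n0 - 1))
    rw [show n0 - 2 + 1 = n0 - 1 from by omega] at hl2
    rw [pvQQ_top (pvA nums) n0 (n0 - 1) (by omega)] at hl2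
    rw [show pvTT (pvA nums) n0 (n0 - 1) = nums.getD (n0 - 1) 0 from by
      unfold pvTT
      rw [show pvSS (pvA nums) n0 = pvSS (pvA nums) (n0 - 1) + pvA nums (n0 - 1) from by
        rw [← pvSS_succ]; congr 1; omega]
      simp [pvA]] at hl2
    rw [e3]
    exact hl2

lemma portB_char (nums : List Int) (n0 : Nat) (h1 : 1 ≤ n0) (h2 : n0 ≤ nums.length) :
    task_6_2_h_alt ((n0 : Nat) : Int) nums
    = List.foldl min (pvCC (pvA nums) n0 0)
        ((List.range (n0 - 1)).map (fun k => pvCC (pvA nums) n0 (k + 1))) := by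
  simp only [task_6_2_h_alt]
  rw [cost0_spec nums n0 h1]
  rw [show PySem.List.pyGetD nums 0 0 = pvSS (pvA nums) 1 from by
    rw [PySem.List.pyGetD_zero]; simp [pvSS, pvA]]
  rw [slice_sum_spec nums n0 h1 h2]
  rw [show ((n0 : Nat) : Int) = ((n0 - 1 : Nat) : Int) + 1 from by omega]
  rw [loop3_spec nums n0 _ rfl (n0 - 1) (by omega)]

-- ===== VERDICT (by name: the statement is the Claim_ definition above) =====
theorem task_6_2_h_spec : Claim_equal_task_6_2_h := by
  unfold Claim_equal_task_6_2_h
  intro n nums _ hpre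
  obtain ⟨hp1, hp2⟩ := hpre
  unfold Spec_task_6_2_h
  have hn : n = ((n.toNat : Nat) : Int) := by omega
  have h1 : 1 ≤ n.toNat := by omega
  have h2 : n.toNat ≤ nums.length := by omega
  rw [hn, portA_char nums n.toNat h1 h2, portB_char nums n.toNat h1 h2]
  obtain ⟨m, hm⟩ : ∃ m, n.toNat = m + 1 := ⟨n.toNat - 1, by omega⟩
  rw [hm]
  simp only [Nat.add_sub_cancel]
  apply foldl_min_perm_cons
  have e1 : pvCC (pvA nums) (m + 1) m :: ((List.range m).reverse).map (pvCC (pvA nums) (m + 1))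
      = ((List.range (m + 1)).map (pvCC (pvA nums) (m + 1))).reverse := by
    rw [List.range_succ, List.map_append, List.reverse_append]
    simp
  have e2 : pvCC (pvA nums) (m + 1) 0
        :: (List.range m).map (fun k => pvCC (pvA nums) (m + 1) (k + 1))
      = (List.range (m + 1)).map (pvCC (pvA nums) (m + 1)) := by
    rw [List.range_succ_eq_map, List.map_cons, List.map_map]
    rfl
  rw [e1, e2]
  exact List.reverse_perm _
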